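-- pv_equiv track=rewrite | github.com/paweln1975/python-matt | 22-challange/22-02-intro/challange-j.py | max_consecutive_values_in_binary
-- ===== SOURCE A (Python) =====
-- def convert_to_binary(n: int) -> str:
--     """
--     Convert an integer to its binary representation without the '0b' prefix.
--
--     Args:
--         n: A base-10 integer
--
--     Returns:
--         Binary representation as a string
--
--     >>> convert_to_binary(23)
--     '10111'
--     """
--     return str(bin(n))[2:]
--
-- def check_bin(s: str) -> bool:
--     return s in ['1', '0']
--
-- def max_consecutive_values_in_binary(n: int, value: str = '1'):
--     """
--     Find the maximum number of consecutive 1's (as default) in the binary representation of n.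
--
--     Args:
--         n: A base-10 integer
--
--     Returns:
--         Maximum count of consecutive 1's
--
--     >>> max_consecutive_values_in_binary(23)
--     3
--
--     >>> max_consecutive_values_in_binary(0)
--     0
--
--     >>> max_consecutive_values_in_binary(255)
--     8
--
--     >>> max_consecutive_values_in_binary(1)
--     1
--
--     >>> max_consecutive_values_in_binary(15)
--     4
--     """
--     max_length = 0
--     binary = convert_to_binary(n)
--     if not all(map(check_bin, binary)):
--         raise ValueError('Wrong values in bin representation.')
--
--     max_current = 0
--     for v in binary:
--         if v == value:
--             max_current += 1
--             max_length = max(max_current, max_length)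
--         else:
--             max_current = 0
--
--     return max_length
-- ===== SOURCE B (Python) =====
-- def convert_to_binary(n: int) -> str:
--     return str(bin(n))[2:]
--
-- def check_bin(s: str) -> bool:
--     return s in ['1', '0']
--
-- def max_consecutive_values_in_binary(n: int, value: str = '1'):
--     binary = convert_to_binary(n)
--     if not all(map(check_bin, binary)):
--         raise ValueError('Wrong values in bin representation.')
--     if value == '1':
--         other = '0'
--     elif value == '0':
--         other = '1'
--     else:
--         return 0
--     return max(len(chunk) for chunk in binary.split(other))
-- ===== Notes on version B (the rewrite author's own statement) =====
-- stated objective: idiomatic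
-- what changed: A's incremental max_current/max_length counter loop is replaced by splitting the binary string on the opposite bit ('0' when counting '1's, '1' when counting '0's) and taking the max of the chunk lengths; values other than '1'/'0' short-circuit to 0.
import Mathlib
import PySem

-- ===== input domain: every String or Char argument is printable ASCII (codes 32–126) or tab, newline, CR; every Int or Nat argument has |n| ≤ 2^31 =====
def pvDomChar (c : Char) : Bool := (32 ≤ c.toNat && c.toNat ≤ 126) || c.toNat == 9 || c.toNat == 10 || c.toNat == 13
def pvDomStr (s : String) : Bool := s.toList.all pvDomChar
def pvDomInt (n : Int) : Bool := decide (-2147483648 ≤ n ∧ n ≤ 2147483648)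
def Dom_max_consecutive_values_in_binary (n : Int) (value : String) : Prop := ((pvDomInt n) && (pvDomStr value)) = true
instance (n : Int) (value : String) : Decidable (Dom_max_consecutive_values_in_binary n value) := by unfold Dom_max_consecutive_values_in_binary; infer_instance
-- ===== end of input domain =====

-- B replaces A's incremental max_current/max_length counting loop by splitting the
-- binary string on the opposite bit and taking the max chunk length (idiomatic rewrite).

-- ===== PORT A =====
-- convert_to_binary: str(bin(n))[2:]
def convert_to_binary (n : Int) : String :=
  PySem.Str.slice (PySem.Int.pyBin n) (some 2) none

-- check_bin: s in ['1', '0']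
def check_bin (s : String) : Bool := ["1", "0"].contains s

def max_consecutive_values_in_binary (n : Int) (value : String) : Int :=
  if !((convert_to_binary n).toList.all (fun v => check_bin (String.ofList [v]))) then
    0  -- Python raises ValueError here (negative n); excluded by Pre_
  else
    ((convert_to_binary n).toList.foldl
      (fun (st : Int × Int) v =>
        if String.ofList [v] = value then (max (st.2 + 1) st.1, st.2 + 1)
        else (st.1, 0))
      (0, 0)).1

-- ===== PORT B =====
-- Python max() over the (always nonempty) list of chunk lengths
def pyMaxInt : List Int → Int
  | [] => 0  -- unreachable: str.split never returns an empty list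
  | h :: t => t.foldl max h

def max_consecutive_values_in_binary_alt (n : Int) (value : String) : Int :=
  if !((convert_to_binary n).toList.all (fun v => check_bin (String.ofList [v]))) then
    0  -- Python raises ValueError here (negative n); excluded by Pre_
  else if value = "1" then
    pyMaxInt ((PySem.Chars.splitOn (convert_to_binary n).toList ['0']).map
      (fun ch => (ch.length : Int)))
  else if value = "0" then
    pyMaxInt ((PySem.Chars.splitOn (convert_to_binary n).toList ['1']).map
      (fun ch => (ch.length : Int)))
  else 0

-- ===== PRECONDITION & SPEC =====
-- For n < 0 bin(n)[2:] starts with 'b', so Python A raises ValueError; Pre_ excludes exactly those.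
def Pre_max_consecutive_values_in_binary (n : Int) (value : String) : Prop := 0 ≤ n
instance (n : Int) (value : String) : Decidable (Pre_max_consecutive_values_in_binary n value) := by unfold Pre_max_consecutive_values_in_binary; infer_instance
def pvWitness_max_consecutive_values_in_binary : Int × String := (23, "1")

def Spec_max_consecutive_values_in_binary (n : Int) (value : String) (out : Int) : Prop := out = max_consecutive_values_in_binary_alt n value
instance (n : Int) (value : String) (out : Int) : Decidable (Spec_max_consecutive_values_in_binary n value out) := by unfold Spec_max_consecutive_values_in_binary; infer_instance

-- ===== CLAIM (what is proved, stated in full; the proofs are below) =====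
def Claim_equal_max_consecutive_values_in_binary : Prop := ∀ (n : Int) (value : String), Dom_max_consecutive_values_in_binary n value → Pre_max_consecutive_values_in_binary n value → Spec_max_consecutive_values_in_binary n value (max_consecutive_values_in_binary n value)

-- ===== LEMMAS AND PROOFS =====

-- structural spec of single-char str.split: chunks accumulated left to right
def chunksFrom (o : Char) (pre : List Char) : List Char → List (List Char)
  | [] => [pre]
  | c :: t => if c = o then pre :: chunksFrom o [] t else chunksFrom o (pre ++ [c]) t

theorem splitOn_go_eq (o : Char) : ∀ (fuel : Nat) (l cur : List Char) (acc : List (List Char)),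
    l.length < fuel →
    PySem.Chars.splitOn.go [o] fuel l cur acc = acc.reverse ++ chunksFrom o cur.reverse l := by
  intro fuel
  induction fuel with
  | zero => intro l cur acc h; omega
  | succ fuel ih =>
    intro l cur acc h
    cases l with
    | nil => simp [PySem.Chars.splitOn.go, chunksFrom]
    | cons c rest =>
      by_cases hc : c = o
      · subst hc
        simp only [PySem.Chars.splitOn.go, List.isPrefixOf, BEq.rfl,
          Bool.and_true, if_pos]
        rw [ih]
        · simp [chunksFrom]
        · simpa using h
      · have hpre : ([o].isPrefixOf (c :: rest)) = false := by
          simp [List.isPrefixOf]; intro hco; exact absurd hco.symm hc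
        simp only [PySem.Chars.splitOn.go, hpre, Bool.false_eq_true, if_neg, not_false_iff]
        rw [ih]
        · simp [chunksFrom, hc]
        · simpa using h
  
theorem splitOn_single (o : Char) (l : List Char) :
    PySem.Chars.splitOn l [o] = chunksFrom o [] l := by
  unfold PySem.Chars.splitOn
  rw [splitOn_go_eq o (l.length + 1) l [] []]
  · simp
  · omega

theorem chunksFrom_head (o : Char) : ∀ (l pre : List Char),
    ∃ h t, chunksFrom o pre l = (pre ++ h) :: t := by
  intro l
  induction l with
  | nil => intro pre; exact ⟨[], [], by simp [chunksFrom]⟩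
  | cons c rest ih =>
    intro pre
    by_cases hc : c = o
    · exact ⟨[], chunksFrom o [] rest, by simp [chunksFrom, hc]⟩
    · obtain ⟨h, t, ht⟩ := ih (pre ++ [c])
      exact ⟨c :: h, t, by simp [chunksFrom, hc, ht]⟩

theorem loop_eq_chunks (value : String) (target other : Char)
    (hv : ∀ c : Char, String.ofList [c] = value ↔ c = target) (hto : target ≠ other) :
    ∀ (l : List Char), (∀ c ∈ l, c = target ∨ c = other) →
    ∀ (ml mc : Int), 0 ≤ mc → mc ≤ ml →
    ∀ (pre : List Char), (pre.length : Int) = mc →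
    (l.foldl
      (fun (st : Int × Int) v =>
        if String.ofList [v] = value then (max (st.2 + 1) st.1, st.2 + 1)
        else (st.1, 0))
      (ml, mc)).1
    = ((chunksFrom other pre l).map (fun ch => (ch.length : Int))).foldl max ml := by
  intro l
  induction l with
  | nil =>
    intro _ ml mc h0 hml pre hpre
    simp [chunksFrom, List.foldl]
    omega
  | cons c rest ih =>
    intro hb ml mc h0 hml pre hpre
    by_cases hc : c = target
    · subst hc
      have hcond : String.ofList [c] = value := (hv c).mpr rfl
      have hco : c ≠ other := hto
      simp only [List.foldl]
      rw [if_pos hcond]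
      rw [show chunksFrom other pre (c :: rest) = chunksFrom other (pre ++ [c]) rest from by
        simp [chunksFrom, hco]]
      rw [ih (fun x hx => hb x (List.mem_cons_of_mem _ hx)) (max (mc + 1) ml) (mc + 1)
        (by omega) (by omega) (pre ++ [c]) (by simp; omega)]
      obtain ⟨h, t, ht⟩ := chunksFrom_head other rest (pre ++ [c])
      rw [ht]
      simp only [List.map, List.foldl]
      congr 1
      have hX : (mc + 1 : Int) ≤ ((pre ++ [c] ++ h).length : Int) := by
        simp only [List.length_append, List.length_cons, List.length_nil]
        push_cast
        omega
      rw [max_assoc]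
      exact max_eq_right (le_trans hX (le_max_right _ _))
    · have hco : c = other := (hb c (List.mem_cons_self)).resolve_left hc
      subst hco
      have hcond : ¬ (String.ofList [c] = value) := fun hq => hc ((hv c).mp hq)
      simp only [List.foldl]
      rw [if_neg hcond]
      rw [show chunksFrom c pre (c :: rest) = pre :: chunksFrom c [] rest from by
        simp [chunksFrom]]
      rw [ih (fun x hx => hb x (List.mem_cons_of_mem _ hx)) ml 0 le_rfl (by omega) [] (by simp)]
      simp only [List.map, List.foldl]
      congr 1
      omega

-- the value-never-matches case: A's loop keeps max_length = 0
theorem loop_no_match (value : String) :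
    ∀ (l : List Char), (∀ c ∈ l, ¬ (String.ofList [c] = value)) →
    ∀ (ml : Int),
    (l.foldl
      (fun (st : Int × Int) v =>
        if String.ofList [v] = value then (max (st.2 + 1) st.1, st.2 + 1)
        else (st.1, 0))
      (ml, 0)).1 = ml := by
  intro l
  induction l with
  | nil => intro _ ml; rfl
  | cons c rest ih =>
    intro hb ml
    simp only [List.foldl, hb c (List.mem_cons_self), if_neg, not_false_iff]
    exact ih (fun x hx => hb x (List.mem_cons_of_mem _ hx)) ml

theorem toDigitsCore_two_bits : ∀ (fuel m : Nat) (acc : List Char),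
    (∀ c ∈ acc, c = '1' ∨ c = '0') →
    ∀ c ∈ Nat.toDigitsCore 2 fuel m acc, c = '1' ∨ c = '0' := by
  intro fuel
  induction fuel with
  | zero => intro m acc hacc; simpa [Nat.toDigitsCore] using hacc
  | succ fuel ih =>
    intro m acc hacc
    have hd : (m % 2).digitChar = '1' ∨ (m % 2).digitChar = '0' := by
      have h2 : m % 2 = 0 ∨ m % 2 = 1 := by omega
      rcases h2 with h | h <;> rw [h] <;> simp [Nat.digitChar]
    have hacc' : ∀ c ∈ (m % 2).digitChar :: acc, c = '1' ∨ c = '0' := by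
      intro c hc
      rcases List.mem_cons.mp hc with h | h
      · exact h ▸ hd
      · exact hacc c h
    simp only [Nat.toDigitsCore]
    split
    · exact fun c hc => hacc' c hc
    · exact ih (m / 2) _ hacc'

theorem binary_bits (n : Int) (hn : 0 ≤ n) :
    ∀ c ∈ (convert_to_binary n).toList, c = '1' ∨ c = '0' := by
  have h1 : (convert_to_binary n).toList = Nat.toDigits 2 n.toNat := by
    unfold convert_to_binary
    rw [PySem.Str.toList_slice, PySem.Chars.slice_eq_listSlice]
    have h2 : (PySem.Int.pyBin n).toList = PySem.Int.toBinChars0b n := PySem.Int.toList_pyBin n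
    rw [h2]
    unfold PySem.Int.toBinChars0b
    rw [if_neg (by omega)]
    rw [PySem.List.slice_from _ (by omega : (0:Int) ≤ 2)]
    rfl
  rw [h1]
  exact toDigitsCore_two_bits _ _ [] (by simp)

theorem check_passes (n : Int) (hn : 0 ≤ n) :
    ((convert_to_binary n).toList.all (fun v => check_bin (String.ofList [v]))) = true := by
  rw [List.all_eq_true]
  intro c hc
  rcases binary_bits n hn c hc with h | h <;> subst h <;> decide

theorem ofList_singleton_eq_iff (c d : Char) : String.ofList [c] = String.ofList [d] ↔ c = d := by
  constructor
  · intro h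
    have h2 := congrArg String.toList h
    simpa using h2
  · intro h; rw [h]

-- ===== VERDICT (by name: the statement is the Claim_ definition above) =====
theorem max_consecutive_values_in_binary_spec : Claim_equal_max_consecutive_values_in_binary := by
  intro n value _ hpre
  unfold Spec_max_consecutive_values_in_binary
  have hn : 0 ≤ n := hpre
  have hchk := check_passes n hn
  have hbits := binary_bits n hn
  unfold max_consecutive_values_in_binary max_consecutive_values_in_binary_alt
  rw [hchk]
  simp only [Bool.not_true, Bool.false_eq_true, if_neg, not_false_iff]
  by_cases h1 : value = "1"
  · subst h1
    rw [if_pos rfl]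
    rw [splitOn_single]
    have hv : ∀ c : Char, String.ofList [c] = "1" ↔ c = '1' := by
      intro c
      have : ("1" : String) = String.ofList ['1'] := rfl
      rw [this, ofList_singleton_eq_iff]
    rw [loop_eq_chunks "1" '1' '0' hv (by decide) _
      (fun c hc => hbits c hc) 0 0 le_rfl le_rfl [] (by simp)]
    obtain ⟨h, t, ht⟩ := chunksFrom_head '0' (convert_to_binary n).toList []
    rw [ht]
    simp only [List.map, pyMaxInt, List.foldl]
    congr 1
  · by_cases h0 : value = "0"
    · subst h0
      rw [if_neg (by decide), if_pos rfl]
      rw [splitOn_single]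
      have hv : ∀ c : Char, String.ofList [c] = "0" ↔ c = '0' := by
        intro c
        have : ("0" : String) = String.ofList ['0'] := rfl
        rw [this, ofList_singleton_eq_iff]
      rw [loop_eq_chunks "0" '0' '1' hv (by decide) _
        (fun c hc => (hbits c hc).symm) 0 0 le_rfl le_rfl [] (by simp)]
      obtain ⟨h, t, ht⟩ := chunksFrom_head '1' (convert_to_binary n).toList []
      rw [ht]
      simp only [List.map, pyMaxInt, List.foldl]
      congr 1
    · rw [if_neg h1, if_neg h0]
      apply loop_no_match
      intro c hc hEq
      rcases hbits c hc with h | h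
      · subst h; exact h1 hEq.symm
      · subst h; exact h0 hEq.symm
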